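-- pv_equiv track=rewrite | github.com/stoq/stoq | stoqlib/lib/boleto.py | modulo11
-- ===== SOURCE A (Python) =====
-- def modulo11(num, base=9, r=0):
--     soma = 0
--     fator = 2
--     for i in range(len(str(num))).__reversed__():
--         parcial10 = int(num[i]) * fator
--         soma += parcial10
--         if fator == base:
--             fator = 1
--         fator += 1
--     if r == 0:
--         soma = soma * 10
--         digito = soma % 11
--         if digito == 10:
--             digito = 0
--         return digito
--     if r == 1:
--         resto = soma % 11
--         return resto
-- ===== SOURCE B (Python) =====
-- def modulo11(num, base=9, r=0):
--     cycle = base - 1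
--     buckets = {}
--     for j, d in enumerate(reversed(str(num))):
--         i = j % cycle
--         buckets[i] = buckets.get(i, 0) + int(d)
--     soma = sum((i + 2) * s for i, s in buckets.items())
--     if r == 0:
--         digito = soma * 10 % 11
--         return 0 if digito == 10 else digito
--     if r == 1:
--         return soma % 11
-- ===== Notes on version B (the rewrite author's own statement) =====
-- stated objective: alternative
-- what changed: Instead of A's single reversed loop with a stateful cycling fator counter, B makes two passes: it first groups the digit sums into a dict keyed by position residue modulo the cycle length (base-1), then combines the buckets as sum((i+2)*s); Pre_ excludes non-digit characters (A raises ValueError) and base < 2, where the weight cycle is degenerate: A's reset branch never fires (accidentally ever-growing weights) while B's residue bucketing divides by the cycle length.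
-- outside the precondition, e.g. on modulo11('12', 1, 0): A returns 4, B raises ZeroDivisionError; on modulo11('12', 0, 0): A returns 4, B returns 5; on modulo11('12', -3, 1): A returns 7, B returns 3
import Mathlib
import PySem

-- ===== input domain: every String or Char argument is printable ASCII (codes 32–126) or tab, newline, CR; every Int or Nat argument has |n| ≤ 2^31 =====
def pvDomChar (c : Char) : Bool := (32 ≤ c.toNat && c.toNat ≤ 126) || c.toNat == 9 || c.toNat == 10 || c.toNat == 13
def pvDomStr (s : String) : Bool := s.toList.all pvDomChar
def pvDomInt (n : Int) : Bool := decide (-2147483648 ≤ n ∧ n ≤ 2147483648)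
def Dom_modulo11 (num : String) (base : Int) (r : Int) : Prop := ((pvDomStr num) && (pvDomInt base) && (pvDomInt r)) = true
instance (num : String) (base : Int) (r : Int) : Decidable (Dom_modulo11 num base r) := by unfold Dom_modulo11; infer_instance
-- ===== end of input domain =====

-- B groups digit sums into residue-class buckets (a dict keyed by position mod base-1) in one
-- pass and combines the buckets afterwards, replacing A's stateful cycling counter; equivalent
-- on Pre_ (digit strings with base ≥ 2, or empty strings).

-- int(c) for a single char: exact for '0'..'9' (Pre_ admits only those; Python raises ValueError otherwise)
def pvDigit (c : Char) : Int := (c.toNat : Int) - 48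

-- ===== PORT A =====
def modulo11 (num : String) (base : Int) (r : Int) : Option Int :=
  let cs := num.toList
  -- for i in range(len(str(num))).__reversed__():
  let st := ((PySem.List.pyRange 0 (cs.length : Int) 1).reverse).foldl
    (fun (st : Int × Int) i =>
      let parcial10 := pvDigit (PySem.List.pyGetD cs i ' ') * st.2
      let soma := st.1 + parcial10
      let fator := if st.2 = base then 1 else st.2
      (soma, fator + 1)) (0, 2)
  let soma := st.1
  if r = 0 then
    let soma := soma * 10
    let digito := PySem.Int.mod soma 11
    some (if digito = 10 then (0 : Int) else digito)
  else if r = 1 then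
    some (PySem.Int.mod soma 11)
  else none

-- ===== PORT B =====
def modulo11_alt (num : String) (base : Int) (r : Int) : Option Int :=
  let cycle := base - 1
  -- for j, d in enumerate(reversed(str(num))): buckets[j % cycle] = buckets.get(j % cycle, 0) + int(d)
  let buckets := (PySem.List.enumerate num.toList.reverse 0).foldl
    (fun (d : PySem.Dict Int Int) (p : Int × Char) =>
      let i := PySem.Int.mod p.1 cycle
      d.insert i (d.getD i 0 + pvDigit p.2)) PySem.Dict.empty
  -- soma = sum((i + 2) * s for i, s in buckets.items())
  let soma := buckets.items.foldl (fun (s : Int) (p : Int × Int) => s + (p.1 + 2) * p.2) 0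
  if r = 0 then
    let digito := PySem.Int.mod (soma * 10) 11
    some (if digito = 10 then (0 : Int) else digito)
  else if r = 1 then
    some (PySem.Int.mod soma 11)
  else none

-- ===== PRECONDITION & SPEC =====
-- Pre_ excludes non-digit characters, where Python A raises ValueError on int(num[i]), and
-- base < 2 (unless num is empty), where the weight cycle is degenerate: A's reset branch never
-- fires (an accidental ever-growing weight sequence) while B's residue bucketing divides by the
-- cycle length (ZeroDivisionError at base 1, nonpositive residues below).
def Pre_modulo11 (num : String) (base : Int) (r : Int) : Prop :=
  (num.toList.all Char.isDigit) = true ∧ (2 ≤ base ∨ num = "")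
instance (num : String) (base : Int) (r : Int) : Decidable (Pre_modulo11 num base r) := by unfold Pre_modulo11; infer_instance
def pvWitness_modulo11 : String × Int × Int := ("0361", 9, 0)

def Spec_modulo11 (num : String) (base : Int) (r : Int) (out : Option Int) : Prop := out = modulo11_alt num base r
instance (num : String) (base : Int) (r : Int) (out : Option Int) : Decidable (Spec_modulo11 num base r out) := by unfold Spec_modulo11; infer_instance

-- ===== CLAIM (what is proved, stated in full; the proofs are below) =====
def Claim_equal_modulo11 : Prop := ∀ (num : String) (base : Int) (r : Int), Dom_modulo11 num base r → Pre_modulo11 num base r → Spec_modulo11 num base r (modulo11 num base r)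

-- ===== LEMMAS AND PROOFS =====

-- A's cycling weight at position j (counting from the rightmost digit), in closed form
def pvWt (base j : Int) : Int := 2 + (if 2 ≤ base then PySem.Int.mod j (base - 1) else j)

-- the reference weighted sum
def pvSumW (base : Int) : List Char → Int → Int
  | [], _ => 0
  | d :: t, j => pvDigit d * pvWt base j + pvSumW base t (j + 1)

-- one step of A's fator update equals the closed-form weight advancing by one
theorem pvWt_step (base j : Int) (hj : 0 ≤ j) :
    (if pvWt base j = base then 1 else pvWt base j) + 1 = pvWt base (j + 1) := by
  unfold pvWt
  by_cases hb : 2 ≤ base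
  · simp only [if_pos hb]
    set m := base - 1 with hm
    have hmpos : 0 < m := by omega
    rw [PySem.Int.mod_eq_emod_of_pos hmpos, PySem.Int.mod_eq_emod_of_pos hmpos]
    have h0 : 0 ≤ j % m := Int.emod_nonneg j (by omega)
    have h1 : j % m < m := Int.emod_lt_of_pos j hmpos
    have hsucc : (j + 1) % m = (j % m + 1) % m := by
      conv_lhs => rw [show j + 1 = (j % m + 1) + m * (j / m) by
        have := Int.mul_ediv_add_emod j m; omega]
      rw [Int.add_mul_emod_self_left]
    by_cases hr : j % m = m - 1
    · have : (j % m + 1) % m = 0 := by rw [hr]; simp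
      rw [hsucc, this]
      have : 2 + (m - 1) = base := by omega
      simp [hr, this]
    · have : (j % m + 1) % m = j % m + 1 := Int.emod_eq_of_lt (by omega) (by omega)
      rw [hsucc, this]
      have hne : ¬ (2 + j % m = base) := by omega
      simp [hne]
      omega
  · simp only [if_neg hb]
    have hne : ¬ (2 + j = base) := by omega
    simp [hne]; omega

-- A's digit-list loop computes s + the reference sum
theorem pvFoldA (base : Int) (ds : List Char) :
    ∀ (s j : Int), 0 ≤ j →
      (ds.foldl (fun (st : Int × Int) d =>
        (st.1 + pvDigit d * st.2, (if st.2 = base then 1 else st.2) + 1)) (s, pvWt base j)).1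
      = s + pvSumW base ds j := by
  induction ds with
  | nil => intro s j hj; simp [pvSumW]
  | cons d t ih =>
    intro s j hj
    simp only [List.foldl_cons, pvSumW]
    rw [pvWt_step base j hj]
    rw [ih (s + pvDigit d * pvWt base j) (j + 1) (by omega)]
    ring

-- A's index loop over range(len).__reversed__() equals the loop over the reversed char list
theorem pvIdxFold (base : Int) (cs : List Char) :
    ∀ (st : Int × Int),
      ((PySem.List.pyRange 0 (cs.length : Int) 1).reverse).foldl
        (fun (st : Int × Int) i =>
          (st.1 + pvDigit (PySem.List.pyGetD cs i ' ') * st.2,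
           (if st.2 = base then 1 else st.2) + 1)) st
      = cs.reverse.foldl (fun (st : Int × Int) d =>
          (st.1 + pvDigit d * st.2, (if st.2 = base then 1 else st.2) + 1)) st := by
  induction cs using List.reverseRecOn with
  | nil => intro st; simp [PySem.List.pyRange_one_eq_nil]
  | append_singleton l c ih =>
    intro st
    have hlen : ((l ++ [c]).length : Int) = (l.length : Int) + 1 := by
      simp
    rw [hlen, PySem.List.pyRange_one_succ_right (a := 0) (b := (l.length : Int)) (by positivity),
        List.reverse_append]
    simp only [List.reverse_singleton, List.singleton_append, List.foldl_cons]
    have hc : PySem.List.pyGetD (l ++ [c]) (l.length : Int) ' ' = c := by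
      rw [PySem.List.pyGetD_eq_getElem (i := (l.length : Int)) (l ++ [c]) ' ' (by positivity) (by simp)]
      simp
    rw [hc]
    have hcong := PySem.List.foldl_congr_mem
      ((PySem.List.pyRange 0 (l.length : Int) 1).reverse)
      (fun (st : Int × Int) i =>
          (st.1 + pvDigit (PySem.List.pyGetD (l ++ [c]) i ' ') * st.2,
           (if st.2 = base then 1 else st.2) + 1))
      (fun (st : Int × Int) i =>
          (st.1 + pvDigit (PySem.List.pyGetD l i ' ') * st.2,
           (if st.2 = base then 1 else st.2) + 1))
      (st.1 + pvDigit c * st.2, (if st.2 = base then 1 else st.2) + 1)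
      (by
        intro acc x hx
        rw [List.mem_reverse, PySem.List.mem_pyRange_one] at hx
        have hxl : x.toNat < l.length := by omega
        have hg : PySem.List.pyGetD (l ++ [c]) x ' ' = PySem.List.pyGetD l x ' ' := by
          rw [PySem.List.pyGetD_eq_getElem (i := x) (l ++ [c]) ' ' hx.1 (by simp; omega),
              PySem.List.pyGetD_eq_getElem (i := x) l ' ' hx.1 (by omega)]
          rw [List.getElem_append_left hxl]
        simp only [hg])
    rw [hcong]
    rw [ih]
    simp

-- the weight at position 0 is 2 (the initial fator)
theorem pvWt_zero (base : Int) : pvWt base 0 = 2 := by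
  unfold pvWt
  by_cases hb : 2 ≤ base
  · have : (0 : Int) % (base - 1) = 0 := Int.zero_emod _
    rw [if_pos hb, PySem.Int.mod_eq_emod_of_pos (by omega : (0:Int) < base - 1), this]
    omega
  · simp [hb]

-- ============ B-side: the bucket dict ============

-- the weighted sum of an items list, (key + 2) * value
def pvIsum (l : List (Int × Int)) : Int := (l.map (fun p => (p.1 + 2) * p.2)).sum

theorem pvFoldItems (l : List (Int × Int)) :
    ∀ s : Int, l.foldl (fun (s : Int) (p : Int × Int) => s + (p.1 + 2) * p.2) s = s + pvIsum l := by
  induction l with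
  | nil => intro s; simp [pvIsum]
  | cons p t ih => intro s; simp only [List.foldl_cons, ih, pvIsum, List.map_cons, List.sum_cons]; ring

-- overwriting the (unique) entry at key i adds (i+2)*v to the weighted sum
theorem pvIsum_overwrite (i w v : Int) :
    ∀ l : List (Int × Int), (l.map Prod.fst).Nodup → (i, w) ∈ l →
      pvIsum (l.map (fun p => if p.1 == i then (i, w + v) else p)) = pvIsum l + (i + 2) * v := by
  intro l
  induction l with
  | nil => intro _ h; simp at h
  | cons q t ih =>
    intro hnd hmem
    simp only [List.map_cons, List.nodup_cons] at hnd
    by_cases hq : q.1 = i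
    · have hti : i ∉ t.map Prod.fst := hq ▸ hnd.1
      have hmap : t.map (fun p => if p.1 == i then (i, w + v) else p) = t.map id := by
        apply List.map_congr_left
        intro p hp
        have hpi : p.1 ≠ i := fun h => hti (h ▸ List.mem_map_of_mem hp)
        simp [hpi]
      have hqw : q = (i, w) := by
        rcases List.mem_cons.mp hmem with h | h
        · exact h.symm
        · exact absurd (show i ∈ t.map Prod.fst from List.mem_map_of_mem h) hti
      subst hqw
      simp only [List.map_cons, beq_self_eq_true, if_true, hmap, List.map_id, pvIsum,
        List.map_cons, List.sum_cons]
      ring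
    · have hmem' : (i, w) ∈ t := by
        rcases List.mem_cons.mp hmem with h | h
        · exact absurd (congrArg Prod.fst h.symm) hq
        · exact h
      have hqf : (q.1 == i) = false := by simp [hq]
      simp only [List.map_cons, hqf, Bool.false_eq_true, if_false, pvIsum, List.map_cons,
        List.sum_cons] at *
      rw [ih hnd.2 hmem']
      ring

-- inserting getD + v at key i adds (i+2)*v to the weighted items sum
theorem pvIsum_insert (d : PySem.Dict Int Int) (i v : Int) (hnd : d.keys.Nodup) :
    pvIsum ((d.insert i (d.getD i 0 + v)).items) = pvIsum d.items + (i + 2) * v := by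
  by_cases hc : d.contains i = true
  · rw [PySem.Dict.items_insert_of_contains d _ hc]
    obtain ⟨w, hw⟩ := Option.isSome_iff_exists.mp (by
      rw [← PySem.Dict.contains_eq_isSome_get? d i]; exact hc)
    have hgd : d.getD i 0 = w := PySem.Dict.getD_of_get?_eq_some d 0 hw
    have hmem : (i, w) ∈ d.items := PySem.Dict.mem_items_of_get?_eq_some d hw
    rw [hgd]
    exact pvIsum_overwrite i w v d.items (by simpa [PySem.Dict.keys] using hnd) hmem
  · have hc' : d.contains i = false := by simpa using hc
    rw [PySem.Dict.items_insert_of_not_contains d _ hc',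
        PySem.Dict.getD_of_not_contains d 0 hc']
    simp [pvIsum]

-- B's bucket-building pass: the weighted items sum accumulates the reference sum
theorem pvFoldB (base : Int) (hb : 2 ≤ base) (ds : List Char) :
    ∀ (j : Int) (d : PySem.Dict Int Int), 0 ≤ j → d.keys.Nodup →
      pvIsum (((PySem.List.enumerate ds j).foldl
        (fun (d : PySem.Dict Int Int) (p : Int × Char) =>
          d.insert (PySem.Int.mod p.1 (base - 1)) (d.getD (PySem.Int.mod p.1 (base - 1)) 0 + pvDigit p.2)) d).items)
      = pvIsum d.items + pvSumW base ds j := by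
  induction ds with
  | nil => intro j d _ _; simp [PySem.List.enumerate_nil, pvSumW]
  | cons c t ih =>
    intro j d hj hnd
    rw [PySem.List.enumerate_cons, List.foldl_cons]
    rw [ih (j + 1) _ (by omega) (PySem.Dict.nodup_keys_insert _ _ _ hnd)]
    rw [pvIsum_insert d _ (pvDigit c) hnd]
    simp only [pvSumW, pvWt, if_pos hb]
    ring

-- ===== VERDICT (by name: the statement is the Claim_ definition above) =====
theorem modulo11_spec : Claim_equal_modulo11 := by
  intro num base r _ hpre
  unfold Spec_modulo11 modulo11 modulo11_alt
  rcases hpre.2 with hb | hempty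
  · have h2 : ((0 : Int), (2 : Int)) = ((0 : Int), pvWt base 0) := by rw [pvWt_zero]
    have hA := pvIdxFold base num.toList ((0 : Int), pvWt base 0)
    have hA' := pvFoldA base num.toList.reverse 0 0 (le_refl 0)
    have hB := pvFoldB base hb num.toList.reverse 0 PySem.Dict.empty (le_refl 0)
      (by simp [PySem.Dict.keys_empty])
    dsimp only
    rw [h2, hA]
    rw [pvFoldItems]
    simp only [hA', hB, zero_add]
    simp [pvIsum, PySem.Dict.empty]
  · subst hempty
    simp [PySem.List.pyRange_one_eq_nil, PySem.List.enumerate_nil, PySem.Dict.empty]
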